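-- pv_equiv track=rewrite | github.com/kresimir-lukin/AdventOfCode2021 | day17.py | find_hit_velocities
-- ===== SOURCE A (Python) =====
-- def find_hit_velocities(xfrom, xto, yfrom, yto):
--     hit_velocities = []
--     for x_initial_velocity in range(1, xto+1):
--         for y_initial_velocity in range(yfrom, -yfrom+1):
--             x = y = 0
--             x_velocity, y_velocity = x_initial_velocity, y_initial_velocity
--             hit = False
--             while x <= xto and y >= yfrom and not hit:
--                 x += x_velocity
--                 y += y_velocity
--                 x_velocity = max(x_velocity-1, 0)
--                 y_velocity -= 1
--                 if xfrom <= x <= xto and yfrom <= y <= yto: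
--                     hit = True
--                     hit_velocities.append((x_initial_velocity, y_initial_velocity))
--     return hit_velocities
-- ===== SOURCE B (Python) =====
-- def _y_hit_times(yfrom, yto, vy):
--     """Step indices t >= 1 at which the y-position lies in [yfrom, yto]."""
--     ts = []
--     t, y, v = 0, 0, vy
--     while y >= yfrom:
--         y += v
--         v -= 1
--         t += 1
--         if yfrom <= y <= yto:
--             ts.append(t)
--     return ts
--
--
-- def _x_position(vx, t):
--     """x-position after t steps from initial x-velocity vx (closed form)."""
--     s = min(t, vx)
--     return vx * s - s * (s - 1) // 2
--
--
-- def find_hit_velocities(xfrom, xto, yfrom, yto):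
--     # x and y motion are independent: precompute, per initial y-velocity, the
--     # finite set of step indices at which y is inside the target band, then
--     # test each (vx, vy) pair by intersecting with the closed-form x-position.
--     if xto < 1:
--         return []  # no candidate initial x-velocity exists
--     ytimes = [(vy, _y_hit_times(yfrom, yto, vy)) for vy in range(yfrom, -yfrom + 1)]
--     result = []
--     for vx in range(1, xto + 1):
--         for vy, ts in ytimes:
--             if any(xfrom <= _x_position(vx, t) <= xto for t in ts):
--                 result.append((vx, vy))
--     return result
-- ===== Notes on version B (the rewrite author's own statement) =====
-- stated objective: faster
-- what changed: B decouples the independent x/y motions: it precomputes, per initial y-velocity, the finite list of step indices at which y is inside the target band, and decides each (vx,vy) pair by testing a closed-form x-position at those few step indices, instead of A's coupled step-by-step simulation per pair.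
import Mathlib
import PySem

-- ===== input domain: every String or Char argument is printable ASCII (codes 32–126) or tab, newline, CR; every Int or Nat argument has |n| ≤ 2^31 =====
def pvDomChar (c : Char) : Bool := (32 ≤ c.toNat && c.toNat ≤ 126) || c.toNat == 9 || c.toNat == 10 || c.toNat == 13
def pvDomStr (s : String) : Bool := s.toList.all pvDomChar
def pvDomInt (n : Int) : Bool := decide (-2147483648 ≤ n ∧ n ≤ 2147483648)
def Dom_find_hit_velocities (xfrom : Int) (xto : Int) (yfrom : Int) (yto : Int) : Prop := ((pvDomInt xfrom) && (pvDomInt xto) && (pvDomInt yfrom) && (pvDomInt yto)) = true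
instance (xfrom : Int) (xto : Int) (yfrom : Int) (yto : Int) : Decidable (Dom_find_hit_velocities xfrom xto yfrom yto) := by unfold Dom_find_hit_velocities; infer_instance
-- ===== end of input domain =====

-- B decouples the independent x/y motions: per-vy y-hit-time tables intersected with a closed-form x-position replace A's coupled per-pair simulation (measured faster by a constant factor).


-- termination measure for the simulation loops: y eventually drops below yfrom
def pvTri : Nat → Nat
  | 0 => 0
  | n + 1 => pvTri n + (n + 1)

def pvMeas (yfrom y vy : Int) : Nat := (y - yfrom + 1).toNat + pvTri ((vy + 1).toNat)

theorem pvMeas_step (yfrom y vy : Int) (h : yfrom ≤ y) :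
    pvMeas yfrom (y + vy) (vy - 1) < pvMeas yfrom y vy := by
  unfold pvMeas
  have e : vy - 1 + 1 = vy := by ring
  rw [e]
  by_cases h1 : 1 ≤ vy
  · have e2 : (vy + 1).toNat = vy.toNat + 1 := by omega
    rw [e2]
    have e3 : pvTri (vy.toNat + 1) = pvTri vy.toNat + (vy.toNat + 1) := rfl
    omega
  · by_cases h0 : vy = 0
    · subst h0
      have e2 : ((0 : Int) + 1).toNat = 1 := by omega
      have e3 : ((0 : Int)).toNat = 0 := by omega
      rw [e2, e3]
      have e4 : pvTri 1 = 1 := rfl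
      have e5 : pvTri 0 = 0 := rfl
      omega
    · have e2 : (vy + 1).toNat = 0 := by omega
      have e3 : vy.toNat = 0 := by omega
      rw [e2, e3]
      omega

-- ===== PORT A =====
-- the inner 'while' loop of A, carrying the whole loop state (including the result list)
def loopA (xfrom xto yfrom yto ivx ivy : Int) (x y vx vy : Int) (hit : Bool)
    (acc : List (Int × Int)) : List (Int × Int) :=
  if h : x ≤ xto ∧ yfrom ≤ y ∧ hit = false then
    -- x' = x + vx, y' = y + vy, vx' = max (vx-1) 0, vy' = vy - 1 (Python's let-bindings inlined)
    if xfrom ≤ x + vx ∧ x + vx ≤ xto ∧ yfrom ≤ y + vy ∧ y + vy ≤ yto then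
      loopA xfrom xto yfrom yto ivx ivy (x + vx) (y + vy) (max (vx - 1) 0) (vy - 1) true (acc ++ [(ivx, ivy)])
    else
      loopA xfrom xto yfrom yto ivx ivy (x + vx) (y + vy) (max (vx - 1) 0) (vy - 1) hit acc
  else acc
termination_by pvMeas yfrom y vy
decreasing_by
  · exact pvMeas_step yfrom y vy h.2.1
  · exact pvMeas_step yfrom y vy h.2.1

def find_hit_velocities (xfrom : Int) (xto : Int) (yfrom : Int) (yto : Int) : List (Int × Int) :=
  (PySem.List.pyRange 1 (xto + 1) 1).foldl (fun acc ivx =>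
    (PySem.List.pyRange yfrom (-yfrom + 1) 1).foldl (fun acc ivy =>
      loopA xfrom xto yfrom yto ivx ivy 0 0 ivx ivy false acc) acc) []

-- ===== PORT B =====
-- _y_hit_times: step indices t ≥ 1 at which the y-position lies in [yfrom, yto]
def ysim (yfrom yto : Int) (t y vy : Int) : List Int :=
  if h : yfrom ≤ y then
    (if yfrom ≤ y + vy ∧ y + vy ≤ yto then [t + 1] else []) ++ ysim yfrom yto (t + 1) (y + vy) (vy - 1)
  else []
termination_by pvMeas yfrom y vy
decreasing_by exact pvMeas_step yfrom y vy h

-- _x_position: closed-form x-position after t steps from initial x-velocity vx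
def xpos (vx t : Int) : Int :=
  let s := min t vx
  vx * s - PySem.Int.floordiv (s * (s - 1)) 2

def find_hit_velocities_alt (xfrom : Int) (xto : Int) (yfrom : Int) (yto : Int) : List (Int × Int) :=
  if xto < 1 then []  -- no candidate initial x-velocity exists
  else
  let ytimes := (PySem.List.pyRange yfrom (-yfrom + 1) 1).map (fun vy => (vy, ysim yfrom yto 0 0 vy))
  (PySem.List.pyRange 1 (xto + 1) 1).foldl (fun result vx =>
    ytimes.foldl (fun result p =>
      if p.2.any (fun t => decide (xfrom ≤ xpos vx t ∧ xpos vx t ≤ xto)) then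
        result ++ [(vx, p.1)]
      else result) result) []

-- ===== PRECONDITION & SPEC =====
def Spec_find_hit_velocities (xfrom : Int) (xto : Int) (yfrom : Int) (yto : Int) (out : List (Int × Int)) : Prop := out = find_hit_velocities_alt xfrom xto yfrom yto
instance (xfrom : Int) (xto : Int) (yfrom : Int) (yto : Int) (out : List (Int × Int)) : Decidable (Spec_find_hit_velocities xfrom xto yfrom yto out) := by unfold Spec_find_hit_velocities; infer_instance

-- ===== CLAIM (what is proved, stated in full; the proofs are below) =====
def Claim_equal_find_hit_velocities : Prop := ∀ (xfrom : Int) (xto : Int) (yfrom : Int) (yto : Int), Dom_find_hit_velocities xfrom xto yfrom yto → Spec_find_hit_velocities xfrom xto yfrom yto (find_hit_velocities xfrom xto yfrom yto)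

-- ===== LEMMAS AND PROOFS =====

theorem floordiv_half (s : Int) : 2 * PySem.Int.floordiv (s * (s - 1)) 2 = s * (s - 1) := by
  obtain ⟨k, hk⟩ := Int.even_mul_succ_self (s - 1)
  have hk' : s * (s - 1) = 2 * k := by linear_combination hk
  rw [hk', PySem.Int.floordiv_eq_ediv_of_pos (by norm_num)]
  rw [Int.mul_ediv_cancel_left _ (by norm_num)]

theorem xpos_step (vx t : Int) (ht : 0 ≤ t) (hv : 1 ≤ vx) :
    xpos vx (t + 1) = xpos vx t + max (vx - t) 0 := by
  unfold xpos
  by_cases h : vx ≤ t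
  · have e1 : min (t + 1) vx = vx := by omega
    have e2 : min t vx = vx := by omega
    have e3 : max (vx - t) 0 = 0 := by omega
    rw [e1, e2, e3]; ring
  · push_neg at h
    have e1 : min (t + 1) vx = t + 1 := by omega
    have e2 : min t vx = t := by omega
    have e3 : max (vx - t) 0 = vx - t := by omega
    rw [e1, e2, e3]
    have h1 := floordiv_half (t + 1)
    have h2 := floordiv_half t
    have key : 2 * (vx * (t + 1) - PySem.Int.floordiv ((t + 1) * (t + 1 - 1)) 2) =
        2 * (vx * t - PySem.Int.floordiv (t * (t - 1)) 2 + (vx - t)) := by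
      linear_combination h2 - h1
    linarith [key]

theorem xpos_mono_aux (vx : Int) (hv : 1 ≤ vx) :
    ∀ (k : Nat) (t : Int), 0 ≤ t → xpos vx t ≤ xpos vx (t + k) := by
  intro k
  induction k with
  | zero => intro t ht; simp
  | succ n ih =>
    intro t ht
    have e : t + ((n : Int) + 1) = (t + n) + 1 := by ring
    have step := xpos_step vx (t + n) (by omega) hv
    have := ih t ht
    have : xpos vx t ≤ xpos vx ((t + n) + 1) := by
      rw [step]; omega
    calc xpos vx t ≤ xpos vx ((t + n) + 1) := this
      _ = xpos vx (t + (↑(n + 1) : Int)) := by push_cast; ring_nf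

theorem xpos_mono (vx t u : Int) (hv : 1 ≤ vx) (ht : 0 ≤ t) (htu : t ≤ u) :
    xpos vx t ≤ xpos vx u := by
  have e : u = t + ((u - t).toNat : Int) := by omega
  rw [e]
  exact xpos_mono_aux vx hv (u - t).toNat t ht

theorem ysim_mem_gt (yfrom yto : Int) :
    ∀ (n : Nat) (t y vy : Int), pvMeas yfrom y vy = n →
      ∀ s ∈ ysim yfrom yto t y vy, t < s := by
  intro n
  induction n using Nat.strong_induction_on with
  | _ n ih =>
    intro t y vy hn s hs
    rw [ysim] at hs
    by_cases h : yfrom ≤ y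
    · simp only [dif_pos h, List.mem_append] at hs
      rcases hs with hs | hs
      · by_cases hy : yfrom ≤ y + vy ∧ y + vy ≤ yto
        · simp only [if_pos hy, List.mem_singleton] at hs; omega
        · simp only [if_neg hy, List.not_mem_nil] at hs
      · have hlt := pvMeas_step yfrom y vy h
        have := ih (pvMeas yfrom (y + vy) (vy - 1)) (by omega) (t + 1) (y + vy) (vy - 1) rfl s hs
        omega
    · simp only [dif_neg h, List.not_mem_nil] at hs

theorem loopA_hit_true (xfrom xto yfrom yto ivx ivy x y vx vy : Int) (acc : List (Int × Int)) :
    loopA xfrom xto yfrom yto ivx ivy x y vx vy true acc = acc := by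
  rw [loopA]
  simp

theorem loopA_eq (xfrom xto yfrom yto ivx ivy : Int) (hivx : 1 ≤ ivx) :
    ∀ (n : Nat) (t x y vx vy : Int) (acc : List (Int × Int)),
      pvMeas yfrom y vy = n → 0 ≤ t → x = xpos ivx t → vx = max (ivx - t) 0 →
      loopA xfrom xto yfrom yto ivx ivy x y vx vy false acc =
        if x ≤ xto ∧ (ysim yfrom yto t y vy).any
            (fun s => decide (xfrom ≤ xpos ivx s ∧ xpos ivx s ≤ xto)) then
          acc ++ [(ivx, ivy)]
        else acc := by
  intro n
  induction n using Nat.strong_induction_on with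
  | _ n ih =>
    intro t x y vx vy acc hn ht hx hvx
    rw [loopA, ysim]
    by_cases hy : yfrom ≤ y
    · by_cases hxle : x ≤ xto
      · have hcond : x ≤ xto ∧ yfrom ≤ y ∧ (false : Bool) = false := ⟨hxle, hy, rfl⟩
        rw [dif_pos hcond, dif_pos hy]
        have hx' : x + vx = xpos ivx (t + 1) := by
          rw [xpos_step ivx t ht hivx, ← hx, hvx]
        have hvx' : max (vx - 1) 0 = max (ivx - (t + 1)) 0 := by omega
        have hmeas := pvMeas_step yfrom y vy hy
        by_cases hhit : xfrom ≤ x + vx ∧ x + vx ≤ xto ∧ yfrom ≤ y + vy ∧ y + vy ≤ yto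
        · rw [if_pos hhit, loopA_hit_true]
          have hyband : yfrom ≤ y + vy ∧ y + vy ≤ yto := ⟨hhit.2.2.1, hhit.2.2.2⟩
          rw [if_pos hyband]
          have hp1 : xfrom ≤ xpos ivx (t + 1) := by rw [← hx']; exact hhit.1
          have hp2 : xpos ivx (t + 1) ≤ xto := by rw [← hx']; exact hhit.2.1
          simp [hxle, hp1, hp2]
        · rw [if_neg hhit]
          rw [ih (pvMeas yfrom (y + vy) (vy - 1)) (by omega) (t + 1) (x + vx) (y + vy)
              (max (vx - 1) 0) (vy - 1) acc rfl (by omega) hx' hvx']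
          -- the head element (if y hits at t+1) contributes false to `any`
          have hhead : ∀ l : List Int,
              ((if yfrom ≤ y + vy ∧ y + vy ≤ yto then [t + 1] else []) ++ l).any
                  (fun s => decide (xfrom ≤ xpos ivx s ∧ xpos ivx s ≤ xto)) =
                l.any (fun s => decide (xfrom ≤ xpos ivx s ∧ xpos ivx s ≤ xto)) := by
            intro l
            by_cases hyband : yfrom ≤ y + vy ∧ y + vy ≤ yto
            · have hnx : ¬ (xfrom ≤ x + vx ∧ x + vx ≤ xto) := by
                intro hc; exact hhit ⟨hc.1, hc.2, hyband.1, hyband.2⟩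
              simp only [if_pos hyband, List.any_append, List.any_cons, List.any_nil]
              have : decide (xfrom ≤ xpos ivx (t + 1) ∧ xpos ivx (t + 1) ≤ xto) = false := by
                rw [← hx']
                simp only [decide_eq_false_iff_not]
                exact hnx
              rw [this]
              simp
            · simp [hyband]
          rw [hhead]
          by_cases hx2 : x + vx ≤ xto
          · simp [hx2, hxle]
          · -- x already past the target: no later step can hit in x
            have hLfalse : ¬ (x + vx ≤ xto ∧ ((ysim yfrom yto (t + 1) (y + vy) (vy - 1)).any (fun s => decide (xfrom ≤ xpos ivx s ∧ xpos ivx s ≤ xto))) = true) := fun hc => hx2 hc.1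
            rw [if_neg hLfalse]
            simp [hxle]
            intro s hs h1
            have hgt : t + 1 < s := ysim_mem_gt yfrom yto _ (t + 1) (y + vy) (vy - 1) rfl s hs
            have hmon : xpos ivx (t + 1) ≤ xpos ivx s :=
              xpos_mono ivx (t + 1) s hivx (by omega) (by omega)
            rw [← hx'] at hmon
            omega
      · have hcond : ¬ (x ≤ xto ∧ yfrom ≤ y ∧ (false : Bool) = false) := by
          intro hc; exact hxle hc.1
        rw [dif_neg hcond]
        simp [hxle]
    · have hcond : ¬ (x ≤ xto ∧ yfrom ≤ y ∧ (false : Bool) = false) := by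
        intro hc; exact hy hc.2.1
      rw [dif_neg hcond, dif_neg hy]
      simp

theorem xpos_zero (ivx : Int) (h : 1 ≤ ivx) : xpos ivx 0 = 0 := by
  unfold xpos
  have e : min (0 : Int) ivx = 0 := by omega
  rw [e]
  norm_num

-- ===== VERDICT (by name: the statement is the Claim_ definition above) =====
theorem find_hit_velocities_spec : Claim_equal_find_hit_velocities := by
  intro xfrom xto yfrom yto _
  unfold Spec_find_hit_velocities find_hit_velocities find_hit_velocities_alt
  by_cases hg : xto < 1
  · rw [if_pos hg, PySem.List.pyRange_one_eq_nil (by omega : xto + 1 ≤ 1)]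
    simp
  rw [if_neg hg]
  simp only [List.foldl_map]
  apply PySem.List.foldl_congr_mem
  intro acc ivx hmem
  rw [PySem.List.mem_pyRange_one] at hmem
  apply PySem.List.foldl_congr_mem
  intro acc' ivy _
  rw [loopA_eq xfrom xto yfrom yto ivx ivy (by omega) (pvMeas yfrom 0 ivy) 0 0 0 ivx ivy acc'
      rfl le_rfl (by rw [xpos_zero ivx (by omega)]) (by omega)]
  have h0 : (0 : Int) ≤ xto := by omega
  simp [h0]
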